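-- pv_equiv track=rewrite | github.com/Anonsov/Sport-Programming | leetcode/contest/contest.py | countPerfectPairs
-- ===== SOURCE A (Python) =====
-- def countPerfectPairs(nums):
--     n = len(nums)
--     cnt = 0
--
--     for i in range(n):
--         for j in range(i+1, n):
--             a, b = nums[i], nums[j]
--             abs_a, abs_b = abs(a), abs(b)
--             abs_diff = abs(a - b)
--             abs_sum = abs(a + b)
--
--             min_abs = min(abs_a, abs_b)
--             max_abs = max(abs_a, abs_b)
--             min_expr = min(abs_diff, abs_sum)
--             max_expr = max(abs_diff, abs_sum)
--             if min_expr <= min_abs and max_expr >= max_abs: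
--                 cnt += 1
--
--     return cnt
-- ===== SOURCE B (Python) =====
-- def countPerfectPairs(nums):
--     # A pair is "perfect" iff max(|a|,|b|) <= 2*min(|a|,|b|); sort the absolute
--     # values and count with a two-pointer sweep instead of checking all pairs.
--     s = sorted(abs(v) for v in nums)
--     cnt = 0
--     i = 0
--     for j in range(len(s)):
--         while 2 * s[i] < s[j]:
--             i += 1
--         cnt += j - i
--     return cnt
-- ===== Notes on version B (the rewrite author's own statement) =====
-- stated objective: faster
-- what changed: Replaces the O(n^2) all-pairs check of min/max of |a-b|,|a+b| with sorting the absolute values and a two-pointer sweep counting, for each j, the indices i with s[j] <= 2*s[i].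
import Mathlib
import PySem

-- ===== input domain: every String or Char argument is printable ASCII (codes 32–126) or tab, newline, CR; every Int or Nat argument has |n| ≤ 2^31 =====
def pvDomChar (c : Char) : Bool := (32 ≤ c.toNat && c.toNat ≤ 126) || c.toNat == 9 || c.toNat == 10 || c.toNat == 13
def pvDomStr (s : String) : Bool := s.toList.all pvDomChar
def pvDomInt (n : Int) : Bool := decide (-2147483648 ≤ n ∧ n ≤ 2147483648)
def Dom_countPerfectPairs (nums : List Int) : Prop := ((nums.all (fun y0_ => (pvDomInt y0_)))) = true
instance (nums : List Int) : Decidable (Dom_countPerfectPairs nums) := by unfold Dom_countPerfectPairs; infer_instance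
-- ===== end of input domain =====

-- B replaces A's O(n^2) all-pairs check by sorting the absolute values and a two-pointer sweep.

-- ===== PORT A =====
def countPerfectPairs (nums : List Int) : Int :=
  let n : Int := nums.length
  (PySem.List.pyRange 0 n 1).foldl (fun cnt i =>
    (PySem.List.pyRange (i + 1) n 1).foldl (fun cnt j =>
      let a := PySem.List.pyGetD nums i 0
      let b := PySem.List.pyGetD nums j 0
      let abs_a := |a|
      let abs_b := |b|
      let abs_diff := |a - b|
      let abs_sum := |a + b|
      let min_abs := min abs_a abs_b
      let max_abs := max abs_a abs_b
      let min_expr := min abs_diff abs_sum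
      let max_expr := max abs_diff abs_sum
      if min_expr ≤ min_abs ∧ max_abs ≤ max_expr then cnt + 1 else cnt) cnt) 0

-- ===== PORT B =====
-- the 'while 2 * s[i] < s[j]: i += 1' loop of Source B (the index guard only makes the
-- recursion total; Python never leaves the range here since the sweep stops at i = j)
def pvAdvance (s : List Int) (v : Int) (i : Nat) : Nat :=
  if h : i < s.length then
    if 2 * s[i] < v then pvAdvance s v (i + 1) else i
  else i
termination_by s.length - i

-- the 'for j in range(len(s))' loop of Source B, state (j, i, cnt)
def pvLoop (s : List Int) (j i : Nat) (cnt : Int) : Int :=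
  if h : j < s.length then
    let i' := pvAdvance s s[j] i
    pvLoop s (j + 1) i' (cnt + ((j : Int) - (i' : Int)))
  else cnt
termination_by s.length - j

def countPerfectPairs_alt (nums : List Int) : Int :=
  let s := PySem.List.sorted (nums.map (fun v => |v|)) (fun x => x) false
  pvLoop s 0 0 0

-- ===== PRECONDITION & SPEC =====
def Spec_countPerfectPairs (nums : List Int) (out : Int) : Prop := out = countPerfectPairs_alt nums
instance (nums : List Int) (out : Int) : Decidable (Spec_countPerfectPairs nums out) := by unfold Spec_countPerfectPairs; infer_instance

-- ===== CLAIM (what is proved, stated in full; the proofs are below) =====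
def Claim_equal_countPerfectPairs : Prop := ∀ (nums : List Int), Dom_countPerfectPairs nums → Spec_countPerfectPairs nums (countPerfectPairs nums)

-- ===== LEMMAS AND PROOFS =====

-- A's per-pair test, as a Bool predicate
def pvCondA (a b : Int) : Bool :=
  decide (min |a - b| |a + b| ≤ min |a| |b| ∧ max |a| |b| ≤ max |a - b| |a + b|)

-- the simplified test on absolute values
def pvQ (x y : Int) : Bool := decide (max x y ≤ 2 * min x y)

-- number of (i < j) pairs of l satisfying q
def pvPC (q : Int → Int → Bool) : List Int → Int
  | [] => 0
  | x :: xs => (xs.countP (q x) : Int) + pvPC q xs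

-- prefix-style pair count: pairs whose later element is in `rest`
def pvPCpre (q : Int → Int → Bool) (pre : List Int) : List Int → Int
  | [] => 0
  | y :: rest => (pre.countP (fun x => q x y) : Int) + pvPCpre q (pre ++ [y]) rest

lemma pvCondA_eq (a b : Int) : pvCondA a b = pvQ |a| |b| := by
  unfold pvCondA pvQ
  simp only [decide_eq_decide, Int.abs_eq_natAbs]
  omega

lemma pvQ_symm (x y : Int) : pvQ x y = pvQ y x := by
  unfold pvQ
  simp only [decide_eq_decide]
  omega

lemma pvPC_map_abs (q : Int → Int → Bool) (l : List Int) :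
    pvPC (fun a b => q |a| |b|) l = pvPC q (l.map (fun v => |v|)) := by
  induction l with
  | nil => rfl
  | cons x xs ih => simp [pvPC, ih, List.countP_map, Function.comp_def]

lemma pvPC_perm (q : Int → Int → Bool) (hq : ∀ a b, q a b = q b a)
    {l l' : List Int} (h : l.Perm l') : pvPC q l = pvPC q l' := by
  induction h with
  | nil => rfl
  | cons x h ih => simp [pvPC, ih, h.countP_eq]
  | swap x y l =>
      simp only [pvPC, List.countP_cons]
      rw [hq y x]
      push_cast
      ring
  | trans _ _ ih1 ih2 => rw [ih1, ih2]

lemma pvPC_append_singleton (q : Int → Int → Bool) (l : List Int) (y : Int) :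
    pvPC q (l ++ [y]) = pvPC q l + (l.countP (fun x => q x y) : Int) := by
  induction l with
  | nil => simp [pvPC]
  | cons x xs ih =>
      simp only [List.cons_append, pvPC, ih, List.countP_append, List.countP_cons,
        List.countP_nil]
      push_cast
      ring

lemma pvPCpre_eq (q : Int → Int → Bool) (rest : List Int) :
    ∀ pre, pvPC q (pre ++ rest) = pvPC q pre + pvPCpre q pre rest := by
  induction rest with
  | nil => intro pre; simp [pvPCpre]
  | cons y r ih =>
      intro pre
      have h : pre ++ y :: r = (pre ++ [y]) ++ r := by simp
      rw [h, ih (pre ++ [y]), pvPC_append_singleton]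
      simp only [pvPCpre]
      ring

lemma pvPC_eq_pre (q : Int → Int → Bool) (l : List Int) :
    pvPC q l = pvPCpre q [] l := by
  have h := pvPCpre_eq q l []
  simpa [pvPC] using h

-- ---------- A-side: countPerfectPairs = pvPC pvCondA ----------

lemma pvPC_eq_sum (q : Int → Int → Bool) (l : List Int) :
    pvPC q l = (((List.range l.length).map
      (fun k => ((l.drop (k + 1)).countP (q (l.getD k 0)) : Int))).sum) := by
  induction l with
  | nil => rfl
  | cons x xs ih =>
      rw [pvPC, ih]
      simp only [List.length_cons, List.range_succ_eq_map, List.map_cons, List.sum_cons,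
        List.map_map]
      simp [Function.comp_def, List.drop_succ_cons]

lemma countPerfectPairs_eq_pvPC (nums : List Int) :
    countPerfectPairs nums = pvPC pvCondA nums := by
  simp only [countPerfectPairs]
  rw [PySem.List.foldl_congr_mem' _ _
    (fun cnt i => cnt +
      ((nums.drop (i + 1).toNat).countP (pvCondA (PySem.List.pyGetD nums i 0)) : Int)) 0
    (by
      intro i hi cnt
      have h0 : (0 : Int) ≤ i + 1 := by
        have := (PySem.List.mem_pyRange_one.1 hi).1
        omega
      rw [PySem.List.foldl_pyRange_pyGetD' nums 0
        (fun cnt b =>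
          if min |PySem.List.pyGetD nums i 0 - b| |PySem.List.pyGetD nums i 0 + b| ≤
              min |PySem.List.pyGetD nums i 0| |b| ∧
              max |PySem.List.pyGetD nums i 0| |b| ≤
              max |PySem.List.pyGetD nums i 0 - b| |PySem.List.pyGetD nums i 0 + b|
          then cnt + 1 else cnt) cnt h0]
      rw [PySem.List.foldl_ite_add_one]
      rfl)]
  rw [PySem.List.foldl_add, PySem.List.pyRange_zero_natCast, List.map_map, pvPC_eq_sum]
  rw [zero_add]
  apply congrArg List.sum
  apply List.map_congr_left
  intro k hk
  have ht : ((k : Int) + 1).toNat = k + 1 := by omega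
  simp [Function.comp, PySem.List.pyGetD_natCast, ht]

-- ---------- B-side lemmas ----------

lemma pvAdvance_le (s : List Int) (v : Int) (i : Nat) : i ≤ pvAdvance s v i := by
  unfold pvAdvance
  split_ifs with h1 h2
  · exact le_trans (Nat.le_succ i) (pvAdvance_le s v (i + 1))
  · exact le_refl i
  · exact le_refl i
termination_by s.length - i

lemma pvAdvance_lt (s : List Int) (v : Int) (i : Nat) :
    ∀ k, i ≤ k → k < pvAdvance s v i → ∀ hk : k < s.length, 2 * s[k] < v := by
  unfold pvAdvance
  split_ifs with h1 h2
  · intro k hik hk hkl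
    rcases Nat.eq_or_lt_of_le hik with rfl | h
    · exact h2
    · exact pvAdvance_lt s v (i + 1) k h hk hkl
  · intro k hik hk _; omega
  · intro k hik hk _; omega
termination_by s.length - i

lemma pvAdvance_le_of_stop (s : List Int) (v : Int) (i : Nat) :
    ∀ m, i ≤ m → ∀ hm : m < s.length, ¬ 2 * s[m] < v → pvAdvance s v i ≤ m := by
  unfold pvAdvance
  split_ifs with h1 h2
  · intro m him hm hstop
    have hne : i ≠ m := by rintro rfl; exact hstop h2
    exact pvAdvance_le_of_stop s v (i + 1) m (by omega) hm hstop
  · intro m him _ _; exact him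
  · intro m him _ _; exact him
termination_by s.length - i

lemma pvAdvance_stopped (s : List Int) (v : Int) (i : Nat)
    (h : pvAdvance s v i < s.length) : ¬ 2 * s[pvAdvance s v i] < v := by
  unfold pvAdvance at *
  split_ifs at h ⊢ with h1 h2
  · exact pvAdvance_stopped s v (i + 1) h
  · exact h2
  · omega
termination_by s.length - i

lemma sorted_getElem_mono {s : List Int} (hs : s.Pairwise (· ≤ ·))
    {p q : Nat} (hpq : p ≤ q) (hq : q < s.length) : s[p]'(by omega) ≤ s[q] := by
  rcases Nat.eq_or_lt_of_le hpq with rfl | h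
  · exact le_refl _
  · exact List.pairwise_iff_getElem.1 hs p q (by omega) hq h

lemma pvLoop_eq (s : List Int) (hs : s.Pairwise (· ≤ ·)) (hnn : ∀ x ∈ s, 0 ≤ x) :
    ∀ (fuel j i : Nat) (cnt : Int), s.length - j = fuel → (hij : i ≤ j) → j ≤ s.length →
    (∀ k m : Nat, (hk : k < i) → (hm1 : j ≤ m) → ∀ hm : m < s.length, 2 * s[k]'(by omega) < s[m]) →
    pvLoop s j i cnt = cnt + pvPCpre pvQ (s.take j) (s.drop j) := by
  intro fuel
  induction fuel with
  | zero =>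
      intro j i cnt hfuel hij hjl hinv
      have hj : j = s.length := by omega
      rw [pvLoop]
      simp [hj, pvPCpre]
  | succ n ih =>
      intro j i cnt hfuel hij hjl hinv
      have hj : j < s.length := by omega
      rw [pvLoop]
      simp only [hj, dif_pos]
      set i' := pvAdvance s s[j] i with hi'
      have hii' : i ≤ i' := pvAdvance_le s s[j] i
      have hstop : ¬ 2 * s[j] < s[j] := by
        have := hnn s[j] (List.getElem_mem hj); omega
      have hi'j : i' ≤ j := pvAdvance_le_of_stop s s[j] i j hij hj hstop
      have hlt : ∀ k : Nat, k < i' → ∀ hk : k < s.length, 2 * s[k] < s[j] := by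
        intro k hk hkl
        by_cases hki : k < i
        · exact hinv k j hki (le_refl j) hj
        · exact pvAdvance_lt s s[j] i k (by omega) hk hkl
      have hge : ¬ 2 * s[i']'(lt_of_le_of_lt hi'j hj) < s[j] :=
        pvAdvance_stopped s s[j] i (lt_of_le_of_lt hi'j hj)
      -- the countP over the prefix equals j - i'
      have hcount : (s.take j).countP (fun x => pvQ x s[j]) = j - i' := by
        have hsplit : s.take j = s.take i' ++ (s.take j).drop i' := by
          conv_lhs => rw [← List.take_append_drop i' (s.take j)]
          rw [List.take_take, Nat.min_eq_left hi'j]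
        rw [hsplit, List.countP_append]
        have hz : (s.take i').countP (fun x => pvQ x s[j]) = 0 := by
          rw [List.countP_eq_zero]
          intro x hx
          obtain ⟨k, hk, hkx⟩ := List.mem_iff_getElem.1 hx
          have hklen : k < i' := by
            have := hk; simp [List.length_take] at this; omega
          have hks : k < s.length := by omega
          have h2 : 2 * s[k] < s[j] := hlt k hklen hks
          have h0 : 0 ≤ s[k] := hnn _ (List.getElem_mem hks)
          have hxv : x = s[k] := by rw [← hkx]; exact List.getElem_take
          subst hxv
          simp only [pvQ, decide_eq_true_eq]
          omega
        have hful : ((s.take j).drop i').countP (fun x => pvQ x s[j])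
            = ((s.take j).drop i').length := by
          rw [List.countP_eq_length]
          intro x hx
          obtain ⟨k, hk, hkx⟩ := List.mem_iff_getElem.1 hx
          have hlen : ((s.take j).drop i').length = j - i' := by
            simp [List.length_take, List.length_drop]; omega
          have hkb : i' + k < j := by rw [hlen] at hk; omega
          have hks : i' + k < s.length := by omega
          have hxv : x = s[i' + k]'hks := by
            rw [← hkx, List.getElem_drop]
            exact List.getElem_take
          subst hxv
          have h0 : 0 ≤ s[i' + k]'hks := hnn _ (List.getElem_mem hks)
          have hle : s[i' + k]'hks ≤ s[j] := sorted_getElem_mono hs (by omega) hj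
          have h2 : s[j] ≤ 2 * s[i' + k]'hks := by
            have hmono : s[i']'(by omega) ≤ s[i' + k]'hks :=
              sorted_getElem_mono hs (by omega) hks
            omega
          simp only [pvQ, decide_eq_true_eq]
          omega
        rw [hz, hful]
        simp [List.length_take, List.length_drop]
        omega
      rw [ih (j + 1) i' (cnt + ((j : Int) - (i' : Int))) (by omega) (by omega) (by omega)
        (by
          intro k m hk hm hml
          have hkl : k < s.length := lt_of_lt_of_le hk (le_trans hi'j (le_of_lt hj))
          have h1 : 2 * s[k]'hkl < s[j] := hlt k hk hkl
          have h2 : s[j] ≤ s[m] := sorted_getElem_mono hs (by omega) hml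
          omega)]
      rw [List.drop_eq_getElem_cons hj]
      simp only [pvPCpre]
      rw [show s.take j ++ [s[j]] = s.take (j + 1) by
        rw [List.take_add_one]
        simp [List.getElem?_eq_getElem hj]]
      rw [hcount]
      push_cast [Nat.cast_sub hi'j]
      ring

theorem countPerfectPairs_eq (nums : List Int) :
    countPerfectPairs nums = countPerfectPairs_alt nums := by
  simp only [countPerfectPairs_alt]
  set s := PySem.List.sorted (nums.map (fun v => |v|)) (fun x => x) false with hsdef
  have hs : s.Pairwise (· ≤ ·) := by
    simpa using PySem.List.sorted_pairwise (nums.map (fun v => |v|)) (fun x => x)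
  have hnn : ∀ x ∈ s, 0 ≤ x := by
    intro x hx
    rw [hsdef, PySem.List.mem_sorted] at hx
    obtain ⟨v, _, rfl⟩ := List.mem_map.1 hx
    exact abs_nonneg v
  have hperm : (nums.map (fun v => |v|)).Perm s :=
    (PySem.List.sorted_perm (nums.map (fun v => |v|)) (fun x => x) false).symm
  rw [countPerfectPairs_eq_pvPC]
  have h1 : pvCondA = fun a b => pvQ |a| |b| :=
    funext fun a => funext fun b => pvCondA_eq a b
  rw [h1, pvPC_map_abs, pvPC_perm pvQ pvQ_symm hperm, pvPC_eq_pre]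
  have h2 := pvLoop_eq s hs hnn (s.length) 0 0 0 (by omega) (by omega) (by omega)
    (by intro k m hk _ _; omega)
  simpa using h2.symm

-- ===== VERDICT (by name: the statement is the Claim_ definition above) =====
theorem countPerfectPairs_spec : Claim_equal_countPerfectPairs := by
  intro nums _
  exact countPerfectPairs_eq nums
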